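-- pv_equiv track=rewrite | github.com/SeredenkoDS/selenium_stuff | tray_playground.py | remaining_time_to_string
-- ===== SOURCE A (Python) =====
-- def remaining_time_to_string(v_time):
--     if v_time <= 0:
--         return "about to start"
--     else:
--         time_limits = [1, 60, 3600, 86400, 604800, -777]
--         time_symbols = ['?', 's', 'm+', 'h+', 'd+', 'w+']
--         for v_i in range(1, len(time_limits)):
--             if v_time < time_limits[v_i] or v_i == len(time_limits) - 1:
--                 return str(v_time // time_limits[v_i - 1]) + time_symbols[v_i]
-- ===== SOURCE B (Python) =====
-- def remaining_time_to_string(v_time):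
--     if v_time <= 0:
--         return "about to start"
--     boundaries = (60, 3600, 86400, 604800)
--     divisors = (1, 60, 3600, 86400, 604800)
--     symbols = ('s', 'm+', 'h+', 'd+', 'w+')
--     # hand-rolled bisect_right: binary search for the first boundary > v_time
--     lo, hi = 0, 4
--     while lo < hi:
--         mid = (lo + hi) // 2
--         if v_time < boundaries[mid]:
--             hi = mid
--         else:
--             lo = mid + 1
--     return str(v_time // divisors[lo]) + symbols[lo]
-- ===== Notes on version B (the rewrite author's own statement) =====
-- stated objective: alternative
-- what changed: Replaced the linear first-match scan over the threshold list (with its '?'/-777 sentinel slots) by a hand-rolled bisect_right binary search over a boundary table indexing parallel divisor/symbol tuples.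
import Mathlib
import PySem

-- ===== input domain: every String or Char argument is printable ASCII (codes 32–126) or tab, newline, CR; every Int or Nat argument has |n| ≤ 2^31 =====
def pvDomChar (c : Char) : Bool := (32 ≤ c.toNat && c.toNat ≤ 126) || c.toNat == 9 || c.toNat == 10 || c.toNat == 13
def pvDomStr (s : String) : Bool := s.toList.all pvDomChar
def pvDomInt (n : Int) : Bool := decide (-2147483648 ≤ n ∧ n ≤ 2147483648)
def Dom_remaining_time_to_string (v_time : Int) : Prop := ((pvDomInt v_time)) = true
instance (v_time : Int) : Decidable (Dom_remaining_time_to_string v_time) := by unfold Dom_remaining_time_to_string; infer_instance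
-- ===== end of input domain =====

-- B replaces A's linear first-match scan over thresholds by a hand-rolled bisect_right binary
-- search over a boundary table with parallel divisor/symbol tables (alternative decomposition).

-- ===== PORT A =====
-- rtLoopA transcribes A's `for v_i in range(1, len(time_limits))` early-return loop.
def rtLoopA (v_time : Int) (time_limits : List Int) (time_symbols : List String) : List Int → String
  | [] => ""  -- Python's loop always returns before exhaustion (last index matches unconditionally)
  | v_i :: rest =>
      if v_time < (PySem.List.pyGet? time_limits v_i).getD 0 ∨ v_i = (time_limits.length : Int) - 1 then
        PySem.Int.toStr (PySem.Int.floordiv v_time ((PySem.List.pyGet? time_limits (v_i - 1)).getD 0))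
          ++ (PySem.List.pyGet? time_symbols v_i).getD ""
      else
        rtLoopA v_time time_limits time_symbols rest

def remaining_time_to_string (v_time : Int) : String :=
  if v_time ≤ 0 then
    "about to start"
  else
    let time_limits : List Int := [1, 60, 3600, 86400, 604800, -777]
    let time_symbols : List String := ["?", "s", "m+", "h+", "d+", "w+"]
    rtLoopA v_time time_limits time_symbols (PySem.List.pyRange 1 6 1)

-- ===== PORT B =====
-- rtBisect transcribes B's `while lo < hi` binary-search loop (bisect_right);
-- the fuel argument (= initial hi - lo, an upper bound on the iteration count) only makes
-- the recursion structural and is never exhausted while lo < hi.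
def rtBisect (v_time : Int) (boundaries : List Int) : Nat → Nat → Nat → Nat
  | 0, lo, _ => lo
  | fuel + 1, lo, hi =>
    if lo < hi then
      let mid := (lo + hi) / 2
      if v_time < (PySem.List.pyGet? boundaries (mid : Int)).getD 0 then
        rtBisect v_time boundaries fuel lo mid
      else
        rtBisect v_time boundaries fuel (mid + 1) hi
    else
      lo

def remaining_time_to_string_alt (v_time : Int) : String :=
  if v_time ≤ 0 then
    "about to start"
  else
    let boundaries : List Int := [60, 3600, 86400, 604800]
    let divisors : List Int := [1, 60, 3600, 86400, 604800]
    let symbols : List String := ["s", "m+", "h+", "d+", "w+"]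
    let lo := rtBisect v_time boundaries 4 0 4
    PySem.Int.toStr (PySem.Int.floordiv v_time ((PySem.List.pyGet? divisors (lo : Int)).getD 0))
      ++ (PySem.List.pyGet? symbols (lo : Int)).getD ""

-- ===== PRECONDITION & SPEC =====
def Spec_remaining_time_to_string (v_time : Int) (out : String) : Prop := out = remaining_time_to_string_alt v_time
instance (v_time : Int) (out : String) : Decidable (Spec_remaining_time_to_string v_time out) := by unfold Spec_remaining_time_to_string; infer_instance

-- ===== CLAIM (what is proved, stated in full; the proofs are below) =====
def Claim_equal_remaining_time_to_string : Prop := ∀ (v_time : Int), Dom_remaining_time_to_string v_time → Spec_remaining_time_to_string v_time (remaining_time_to_string v_time)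

-- ===== LEMMAS AND PROOFS =====

-- ===== VERDICT (by name: the statement is the Claim_ definition above) =====
theorem remaining_time_to_string_spec : Claim_equal_remaining_time_to_string := by
  intro v _
  have hr : PySem.List.pyRange 1 6 1 = [1, 2, 3, 4, 5] := by decide
  unfold Spec_remaining_time_to_string
  unfold remaining_time_to_string remaining_time_to_string_alt
  by_cases h0 : v ≤ 0
  · simp [h0]
  · by_cases h1 : v < 60
    · have hb : v < 3600 := by omega
      have hc : v < 86400 := by omega
      simp [h0, h1, hb, hc, hr, rtLoopA, rtBisect, PySem.List.pyGet?, PySem.List.pyIdx?]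
    · by_cases h2 : v < 3600
      · have hc : v < 86400 := by omega
        simp [h0, h1, h2, hc, hr, rtLoopA, rtBisect, PySem.List.pyGet?, PySem.List.pyIdx?]
      · by_cases h3 : v < 86400
        · simp [h0, h1, h2, h3, hr, rtLoopA, rtBisect, PySem.List.pyGet?, PySem.List.pyIdx?]
        · by_cases h4 : v < 604800
          · simp [h0, h1, h2, h3, h4, hr, rtLoopA, rtBisect, PySem.List.pyGet?, PySem.List.pyIdx?]
          · simp [h0, h1, h2, h3, h4, hr, rtLoopA, rtBisect, PySem.List.pyGet?, PySem.List.pyIdx?]
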